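-- pv_equiv track=rewrite | github.com/thomas-daniels/SE-Chatbot | builtins/translate.py | parse
-- ===== SOURCE A (Python) =====
-- def parse(json):
--     is_open = False
--     is_backslash = False
--     is_translation = True
--     all_str = []
--     curr_str = []
--     for c in json:
--         if c != '"' and not is_open:
--             continue
--         elif c == '"' and not is_open:
--             is_open = True
--         elif c == '\\':
--             is_backslash = not is_backslash
--             if is_translation:
--                 curr_str.append(c)
--         elif c == '"' and is_open and not is_backslash:
--             is_open = False
--             if is_translation:
--                 s = "".join(curr_str).replace("\\\\", "\\").replace("\\\"", "\"")
--                 all_str.append(s)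
--             curr_str = []
--             is_backslash = False
--             is_translation = not is_translation
--         else:
--             is_backslash = False
--             if is_translation:
--                 curr_str.append(c)
--     return " ".join(all_str)
-- ===== SOURCE B (Python) =====
-- def parse(json):
--     # Split once on '"'; walk the pieces merging escaped quotes, collecting the
--     # raw contents of complete quoted strings; keep every other one (the
--     # translations), unescape, and join with spaces.
--     parts = json.split('"')
--     tokens = []
--     cur = None  # None = outside a string, else the content accumulated so far
--     for part in parts[:-1]:  # each piece is followed by a '"' in the input
--         if cur is None:
--             cur = ""  # that quote opens a string
--         elif (len(part) - len(part.rstrip("\\"))) % 2 == 1: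
--             cur += part + '"'  # odd trailing backslashes: the quote is escaped
--         else:
--             tokens.append(cur + part)  # the quote closes the string
--             cur = None
--     return " ".join(t.replace("\\\\", "\\").replace('\\"', '"')
--                     for t in tokens[::2])
-- ===== Notes on version B (the rewrite author's own statement) =====
-- stated objective: faster
-- what changed: Replaces the per-character flag state machine with a split-then-merge pipeline: split the input once on the double-quote character, walk the pieces merging those that end in an odd run of backslashes (escaped quote), collect complete string contents, keep the even-indexed ones, unescape and join.
import Mathlib
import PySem

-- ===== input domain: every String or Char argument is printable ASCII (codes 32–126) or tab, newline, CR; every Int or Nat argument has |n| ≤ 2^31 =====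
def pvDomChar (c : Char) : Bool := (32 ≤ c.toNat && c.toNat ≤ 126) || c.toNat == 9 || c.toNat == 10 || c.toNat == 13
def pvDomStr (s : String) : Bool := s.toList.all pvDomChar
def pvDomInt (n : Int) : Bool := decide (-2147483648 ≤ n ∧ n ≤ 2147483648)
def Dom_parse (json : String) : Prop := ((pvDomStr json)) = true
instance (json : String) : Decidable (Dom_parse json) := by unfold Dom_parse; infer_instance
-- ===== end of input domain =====

-- B replaces A's per-character flag state machine with a split-on-quote / merge-escaped-pieces
-- pipeline (objective: faster by a constant factor in Python; same O(n)).

-- the unescape chain '.replace("\\\\","\\").replace("\\\"","\"")' shared verbatim by both Pythons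
def unesc (cs : List Char) : List Char :=
  PySem.Chars.replace (PySem.Chars.replace cs ['\\', '\\'] ['\\']) ['\\', '"'] ['"']

-- ===== PORT A =====
structure StA where
  isOpen : Bool
  isBs : Bool
  isTr : Bool
  all : List (List Char)
  cur : List Char

def stepA (st : StA) (c : Char) : StA :=
  if c ≠ '"' ∧ st.isOpen = false then st
  else if c = '"' ∧ st.isOpen = false then { st with isOpen := true }
  else if c = '\\' then
    { st with isBs := !st.isBs, cur := if st.isTr then st.cur ++ ['\\'] else st.cur }
  else if c = '"' ∧ st.isOpen = true ∧ st.isBs = false then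
    { isOpen := false, isBs := false, isTr := !st.isTr,
      all := if st.isTr then st.all ++ [unesc st.cur] else st.all, cur := [] }
  else { st with isBs := false, cur := if st.isTr then st.cur ++ [c] else st.cur }

def parse (json : String) : String :=
  String.ofList (PySem.Chars.join [' '] ((json.toList.foldl stepA ⟨false, false, true, [], []⟩).all))

-- ===== PORT B =====
-- hand port of part.rstrip("\\") (exact: strips trailing '\\' characters)
def rstripBs (p : List Char) : List Char := (p.reverse.dropWhile (· == '\\')).reverse

def stepB (st : List (List Char) × Option (List Char)) (part : List Char) :
    List (List Char) × Option (List Char) :=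
  match st.2 with
  | none => (st.1, some [])
  | some cur =>
    if (part.length - (rstripBs part).length) % 2 == 1 then (st.1, some (cur ++ part ++ ['"']))
    else (st.1 ++ [cur ++ part], none)

def parse_alt (json : String) : String :=
  let parts := PySem.Chars.splitOn json.toList ['"']
  let tokens := (parts.dropLast.foldl stepB ([], none)).1
  String.ofList (PySem.Chars.join [' ']
    (((PySem.List.enumerate tokens 0).filter (fun p => p.1 % 2 == 0)).map (fun p => unesc p.2)))

-- ===== PRECONDITION & SPEC =====
def Spec_parse (json : String) (out : String) : Prop := out = parse_alt json
instance (json : String) (out : String) : Decidable (Spec_parse json out) := by unfold Spec_parse; infer_instance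

-- ===== CLAIM (what is proved, stated in full; the proofs are below) =====
def Claim_equal_parse : Prop := ∀ (json : String), Dom_parse json → Spec_parse json (parse json)

-- ===== LEMMAS AND PROOFS =====

-- keep every other token starting with flag t
def selectT (t : Bool) : List (List Char) → List (List Char)
  | [] => []
  | x :: xs => if t then x :: selectT (!t) xs else selectT (!t) xs

-- reference tokenizer over the quote-split pieces, consuming head chars one at a time;
-- tokN: outside a string (skip piece, the separating quote opens);
-- tokC bs buf: inside a string, bs = pending backslash, buf = content so far
mutual
def tokN : List (List Char) → List (List Char)
  | [] => []
  | [_] => []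
  | _ :: q :: rest => tokC false [] (q :: rest)
  termination_by ps => ps.flatten.length + ps.length
  decreasing_by (simp [List.flatten]; try omega)

def tokC (bs : Bool) (buf : List Char) : List (List Char) → List (List Char)
  | [] => []
  | [_] => []
  | [] :: q :: rest =>
    if bs then tokC false (buf ++ ['"']) (q :: rest)
    else buf :: tokN (q :: rest)
  | (c :: p) :: q :: rest =>
    if bs then tokC false (buf ++ [c]) (p :: q :: rest)
    else if c = '\\' then tokC true (buf ++ ['\\']) (p :: q :: rest)
    else tokC false (buf ++ [c]) (p :: q :: rest)
  termination_by ps => ps.flatten.length + ps.length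
  decreasing_by all_goals (simp [List.flatten]; try omega)
end

-- simple reference splitter: splitQ cs = cs.split('"')
def splitQ : List Char → List (List Char)
  | [] => [[]]
  | c :: cs => if c = '"' then [] :: splitQ cs else (c :: (splitQ cs).headI) :: (splitQ cs).tail

theorem splitQ_cons_form (cs : List Char) : splitQ cs = (splitQ cs).headI :: (splitQ cs).tail := by
  cases cs with
  | nil => rfl
  | cons c cs => simp only [splitQ]; split <;> rfl

theorem goSpec (l : List Char) : ∀ (fuel : Nat) (cur : List Char) (acc : List (List Char)),
    l.length ≤ fuel →
    PySem.Chars.splitOn.go ['"'] fuel l cur acc =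
      acc.reverse ++ (cur.reverse ++ (splitQ l).headI) :: (splitQ l).tail := by
  induction l with
  | nil =>
    intro fuel cur acc _
    cases fuel <;> simp [PySem.Chars.splitOn.go, splitQ]
  | cons c rest ih =>
    intro fuel cur acc hlen
    cases fuel with
    | zero => simp at hlen
    | succ f =>
      simp only [PySem.Chars.splitOn.go, List.isPrefixOf, Bool.and_true]
      by_cases hc : c = '"'
      · subst hc
        simp only [beq_self_eq_true, if_pos, List.length_cons, List.length_nil, List.drop_succ_cons,
          List.drop_zero]
        rw [ih f [] _ (by simpa using hlen)]
        rw [show splitQ ('"' :: rest) = [] :: splitQ rest from by rw [splitQ, if_pos rfl]]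
        rw [splitQ_cons_form rest]
        simp
      · have hbeq : ('"' == c) = false := beq_eq_false_iff_ne.mpr (fun h => hc h.symm)
        simp only [hbeq, if_neg, Bool.false_eq_true, not_false_iff]
        rw [ih f (c :: cur) acc (by simpa using hlen)]
        rw [show splitQ (c :: rest) = (c :: (splitQ rest).headI) :: (splitQ rest).tail from by
          rw [splitQ, if_neg hc]]
        simp

theorem splitOn_eq_splitQ (l : List Char) : PySem.Chars.splitOn l ['"'] = splitQ l := by
  unfold PySem.Chars.splitOn
  rw [goSpec l (l.length + 1) [] [] (by omega)]
  simp
  exact (splitQ_cons_form l).symm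

theorem tokN_single (p : List Char) : tokN [p] = [] := by simp [tokN]
theorem tokN_cons (p q : List Char) (rest : List (List Char)) :
    tokN (p :: q :: rest) = tokC false [] (q :: rest) := by simp [tokN]
theorem tokC_single (b : Bool) (buf p : List Char) : tokC b buf [p] = [] := by simp [tokC]
theorem tokC_nil_false (buf q : List Char) (rest : List (List Char)) :
    tokC false buf ([] :: q :: rest) = buf :: tokN (q :: rest) := by simp [tokC]
theorem tokC_nil_true (buf q : List Char) (rest : List (List Char)) :
    tokC true buf ([] :: q :: rest) = tokC false (buf ++ ['"']) (q :: rest) := by simp [tokC]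
theorem tokC_cons_true (buf p q : List Char) (c : Char) (rest : List (List Char)) :
    tokC true buf ((c :: p) :: q :: rest) = tokC false (buf ++ [c]) (p :: q :: rest) := by
  simp [tokC]
theorem tokC_cons_false_bs (buf p q : List Char) (rest : List (List Char)) :
    tokC false buf (('\\' :: p) :: q :: rest) = tokC true (buf ++ ['\\']) (p :: q :: rest) := by
  simp [tokC]
theorem tokC_cons_false_other (buf p q : List Char) (c : Char) (hb : c ≠ '\\')
    (rest : List (List Char)) :
    tokC false buf ((c :: p) :: q :: rest) = tokC false (buf ++ [c]) (p :: q :: rest) := by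
  simp [tokC, hb]
theorem tokN_head (p p' : List Char) (rest : List (List Char)) :
    tokN (p :: rest) = tokN (p' :: rest) := by
  cases rest with
  | nil => simp [tokN_single]
  | cons q r => simp [tokN_cons]

theorem stepA_closed_quote (b t : Bool) (all : List (List Char)) (cur : List Char) :
    stepA ⟨false, b, t, all, cur⟩ '"' = ⟨true, b, t, all, cur⟩ := by simp [stepA]
theorem stepA_closed_other (b t : Bool) (all : List (List Char)) (cur : List Char)
    (c : Char) (hc : c ≠ '"') :
    stepA ⟨false, b, t, all, cur⟩ c = ⟨false, b, t, all, cur⟩ := by simp [stepA, hc]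
theorem stepA_open_bs (b t : Bool) (all : List (List Char)) (cur : List Char) :
    stepA ⟨true, b, t, all, cur⟩ '\\' =
      ⟨true, !b, t, all, if t then cur ++ ['\\'] else cur⟩ := by simp [stepA]
theorem stepA_esc_quote (t : Bool) (all : List (List Char)) (cur : List Char) :
    stepA ⟨true, true, t, all, cur⟩ '"' =
      ⟨true, false, t, all, if t then cur ++ ['"'] else cur⟩ := by simp [stepA]
theorem stepA_open_other (b t : Bool) (all : List (List Char)) (cur : List Char)
    (c : Char) (hc : c ≠ '"') (hb : c ≠ '\\') :
    stepA ⟨true, b, t, all, cur⟩ c =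
      ⟨true, false, t, all, if t then cur ++ [c] else cur⟩ := by simp [stepA, hc, hb]

theorem Afold (cs : List Char) :
    ∀ (t : Bool) (all : List (List Char)) (buf : List Char),
      ((cs.foldl stepA ⟨false, false, t, all, []⟩).all
          = all ++ (selectT t (tokN (splitQ cs))).map unesc)
      ∧ ((cs.foldl stepA ⟨true, false, t, all, if t then buf else []⟩).all
          = all ++ (selectT t (tokC false buf (splitQ cs))).map unesc)
      ∧ ((cs.foldl stepA ⟨true, true, t, all, if t then buf else []⟩).all
          = all ++ (selectT t (tokC true buf (splitQ cs))).map unesc) := by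
  induction cs with
  | nil =>
    intro t all buf
    refine ⟨?_, ?_, ?_⟩ <;>
      simp [splitQ, tokN_single, tokC_single, selectT]
  | cons c cs ih =>
    intro t all buf
    refine ⟨?_, ?_, ?_⟩
    · -- closed state
      by_cases hc : c = '"'
      · subst hc
        rw [List.foldl_cons, stepA_closed_quote]
        have h2 := (ih t all []).2.1
        rw [ite_self] at h2
        rw [h2]
        rw [show splitQ ('"' :: cs) = [] :: splitQ cs from by rw [splitQ, if_pos rfl]]
        rw [splitQ_cons_form cs, tokN_cons, ← splitQ_cons_form cs]
      · rw [List.foldl_cons, stepA_closed_other _ _ _ _ _ hc, (ih t all buf).1]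
        rw [show splitQ (c :: cs) = (c :: (splitQ cs).headI) :: (splitQ cs).tail from by
          rw [splitQ, if_neg hc]]
        rw [tokN_head _ (splitQ cs).headI, ← splitQ_cons_form cs]
    · -- open, no pending backslash
      by_cases hc : c = '"'
      · subst hc
        rw [show splitQ ('"' :: cs) = [] :: splitQ cs from by rw [splitQ, if_pos rfl]]
        rw [splitQ_cons_form cs, tokC_nil_false, ← splitQ_cons_form cs]
        cases t with
        | false =>
          rw [List.foldl_cons]
          rw [show stepA ⟨true, false, false, all, if false = true then buf else []⟩ '"'
              = ⟨false, false, true, all, []⟩ from by simp [stepA]]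
          rw [(ih true all buf).1]
          simp [selectT]
        | true =>
          rw [List.foldl_cons]
          rw [show stepA ⟨true, false, true, all, if true = true then buf else []⟩ '"'
              = ⟨false, false, false, all ++ [unesc buf], []⟩ from by simp [stepA]]
          rw [(ih false (all ++ [unesc buf]) buf).1]
          simp [selectT]
      · by_cases hb : c = '\\'
        · subst hb
          rw [List.foldl_cons, stepA_open_bs]
          simp only [Bool.not_false]
          have h3 := (ih t all (buf ++ ['\\'])).2.2
          have hcur : (if t then (if t then buf else []) ++ ['\\'] else (if t then buf else []))
              = (if t then buf ++ ['\\'] else []) := by cases t <;> simp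
          rw [hcur, h3]
          rw [show splitQ ('\\' :: cs) = ('\\' :: (splitQ cs).headI) :: (splitQ cs).tail from by
            rw [splitQ, if_neg (by decide)]]
          rcases htl : (splitQ cs).tail with _ | ⟨q, rest⟩
          · rw [splitQ_cons_form cs, htl, tokC_single, tokC_single]
          · rw [splitQ_cons_form cs, htl, tokC_cons_false_bs]
            simp [List.headI]
        · rw [List.foldl_cons, stepA_open_other _ _ _ _ _ hc hb]
          have h2 := (ih t all (buf ++ [c])).2.1
          have hcur : (if t then (if t then buf else []) ++ [c] else (if t then buf else []))
              = (if t then buf ++ [c] else []) := by cases t <;> simp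
          rw [hcur, h2]
          rw [show splitQ (c :: cs) = (c :: (splitQ cs).headI) :: (splitQ cs).tail from by
            rw [splitQ, if_neg hc]]
          rcases htl : (splitQ cs).tail with _ | ⟨q, rest⟩
          · rw [splitQ_cons_form cs, htl, tokC_single, tokC_single]
          · rw [splitQ_cons_form cs, htl, tokC_cons_false_other _ _ _ _ hb]
            simp [List.headI]
    · -- open, pending backslash
      by_cases hc : c = '"'
      · subst hc
        rw [List.foldl_cons, stepA_esc_quote]
        have h2 := (ih t all (buf ++ ['"'])).2.1
        have hcur : (if t then (if t then buf else []) ++ ['"'] else (if t then buf else []))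
            = (if t then buf ++ ['"'] else []) := by cases t <;> simp
        rw [hcur, h2]
        rw [show splitQ ('"' :: cs) = [] :: splitQ cs from by rw [splitQ, if_pos rfl]]
        rw [splitQ_cons_form cs, tokC_nil_true, ← splitQ_cons_form cs]
      · by_cases hb : c = '\\'
        · subst hb
          rw [List.foldl_cons, stepA_open_bs]
          simp only [Bool.not_true]
          have h2 := (ih t all (buf ++ ['\\'])).2.1
          have hcur : (if t then (if t then buf else []) ++ ['\\'] else (if t then buf else []))
              = (if t then buf ++ ['\\'] else []) := by cases t <;> simp
          rw [hcur, h2]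
          rw [show splitQ ('\\' :: cs) = ('\\' :: (splitQ cs).headI) :: (splitQ cs).tail from by
            rw [splitQ, if_neg (by decide)]]
          rcases htl : (splitQ cs).tail with _ | ⟨q, rest⟩
          · rw [splitQ_cons_form cs, htl, tokC_single, tokC_single]
          · rw [splitQ_cons_form cs, htl, tokC_cons_true]
            simp [List.headI]
        · rw [List.foldl_cons, stepA_open_other _ _ _ _ _ hc hb]
          have h2 := (ih t all (buf ++ [c])).2.1
          have hcur : (if t then (if t then buf else []) ++ [c] else (if t then buf else []))
              = (if t then buf ++ [c] else []) := by cases t <;> simp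
          rw [hcur, h2]
          rw [show splitQ (c :: cs) = (c :: (splitQ cs).headI) :: (splitQ cs).tail from by
            rw [splitQ, if_neg hc]]
          rcases htl : (splitQ cs).tail with _ | ⟨q, rest⟩
          · rw [splitQ_cons_form cs, htl, tokC_single, tokC_single]
          · rw [splitQ_cons_form cs, htl, tokC_cons_true]
            simp [List.headI]

-- length of the trailing backslash run
def runBs (p : List Char) : Nat := (p.reverse.takeWhile (· == '\\')).length

-- B's test '(len(part) - len(part.rstrip("\\"))) % 2 == 1'
def oddT (p : List Char) : Bool := (p.length - (rstripBs p).length) % 2 == 1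

theorem runBs_le (p : List Char) : runBs p ≤ p.length := by
  have := congrArg List.length
    (List.takeWhile_append_dropWhile (p := fun c => c == '\\') (l := p.reverse))
  simp only [List.length_append, List.length_reverse] at this
  simp only [runBs]
  omega

theorem oddT_eq_run (p : List Char) : oddT p = (runBs p % 2 == 1) := by
  have h1 : (rstripBs p).length = p.length - runBs p := by
    have := congrArg List.length
      (List.takeWhile_append_dropWhile (p := fun c => c == '\\') (l := p.reverse))
    simp only [List.length_append, List.length_reverse] at this
    simp only [rstripBs, List.length_reverse, runBs]
    omega
  have h2 := runBs_le p
  simp only [oddT, h1]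
  congr 1
  omega

theorem runBs_cons (c : Char) (p : List Char) :
    runBs (c :: p) = if runBs p = p.length then (if c = '\\' then p.length + 1 else p.length)
      else runBs p := by
  simp only [runBs, List.reverse_cons, List.takeWhile_append, List.length_reverse]
  by_cases hf : (List.takeWhile (fun c => c == '\\') p.reverse).length = p.length
  · rw [if_pos hf, if_pos hf]
    by_cases hc : c = '\\'
    · subst hc; simp
    · simp [List.takeWhile, hc]
      simp [show (c == '\\') = false from beq_eq_false_iff_ne.mpr hc]
  · rw [if_neg hf, if_neg hf]

theorem oddT_cons_other (c : Char) (p : List Char) (hc : c ≠ '\\') :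
    oddT (c :: p) = oddT p := by
  rw [oddT_eq_run, oddT_eq_run, runBs_cons]
  by_cases hf : runBs p = p.length
  · rw [if_pos hf, if_neg hc, hf]
  · rw [if_neg hf]

theorem oddT_bs_bs (p : List Char) : oddT ('\\' :: '\\' :: p) = oddT p := by
  have e : runBs ('\\' :: '\\' :: p) % 2 = runBs p % 2 := by
    rw [runBs_cons, runBs_cons]
    by_cases hf : runBs p = p.length
    · simp [hf]
      omega
    · have hlt : runBs p < p.length := lt_of_le_of_ne (runBs_le p) hf
      simp only [if_neg hf, List.length_cons]
      rw [if_neg (by omega)]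
  rw [oddT_eq_run, oddT_eq_run, e]

theorem oddT_bs_other (c : Char) (p : List Char) (hc : c ≠ '\\') :
    oddT ('\\' :: c :: p) = oddT p := by
  rw [← oddT_cons_other c p hc, oddT_eq_run, oddT_eq_run (c :: p), runBs_cons]
  have h1 : runBs (c :: p) ≤ p.length := by
    rw [runBs_cons]
    by_cases hf : runBs p = p.length
    · rw [if_pos hf, if_neg hc]
    · rw [if_neg hf]; exact runBs_le p
  rw [if_neg (by simp only [List.length_cons]; omega)]

theorem oddT_nil : oddT [] = false := by decide

theorem oddT_bs_single : oddT ['\\'] = true := by decide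

theorem L_part : ∀ (n : Nat) (p : List Char), p.length ≤ n → ∀ (buf q : List Char)
    (rest : List (List Char)),
    tokC false buf (p :: q :: rest) =
      if oddT p then tokC false (buf ++ p ++ ['"']) (q :: rest)
      else (buf ++ p) :: tokN (q :: rest) := by
  intro n
  induction n with
  | zero =>
    intro p hp buf q rest
    have : p = [] := List.length_eq_zero_iff.mp (Nat.le_zero.mp hp)
    subst this
    rw [tokC_nil_false, oddT_nil, if_neg (by simp)]
    simp
  | succ n ih =>
    intro p hp buf q rest
    cases p with
    | nil =>
      rw [tokC_nil_false, oddT_nil, if_neg (by simp)]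
      simp
    | cons c p' =>
      by_cases hc : c = '\\'
      · subst hc
        cases p' with
        | nil =>
          rw [tokC_cons_false_bs, tokC_nil_true, oddT_bs_single, if_pos rfl]
        | cons c2 p'' =>
          rw [tokC_cons_false_bs, tokC_cons_true,
            ih p'' (by simp at hp ⊢; omega) (buf ++ ['\\'] ++ [c2]) q rest]
          by_cases hc2 : c2 = '\\'
          · subst hc2
            rw [oddT_bs_bs]
            by_cases ho : oddT p''
            · rw [if_pos ho, if_pos ho]; simp
            · rw [if_neg (by simp [ho]), if_neg (by simp [ho])]; simp
          · rw [oddT_bs_other c2 p'' hc2]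
            by_cases ho : oddT p''
            · rw [if_pos ho, if_pos ho]; simp
            · rw [if_neg (by simp [ho]), if_neg (by simp [ho])]; simp
      · rw [tokC_cons_false_other _ _ _ _ hc, ih p' (by simp at hp; omega) (buf ++ [c]) q rest,
          oddT_cons_other c p' hc]
        by_cases ho : oddT p'
        · rw [if_pos ho, if_pos ho]; simp
        · rw [if_neg (by simp [ho]), if_neg (by simp [ho])]; simp

theorem stepB_none (toks : List (List Char)) (p : List Char) :
    stepB (toks, none) p = (toks, some []) := rfl

theorem stepB_some (toks : List (List Char)) (buf p : List Char) :
    stepB (toks, some buf) p =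
      if oddT p then (toks, some (buf ++ p ++ ['"'])) else (toks ++ [buf ++ p], none) := by
  simp only [stepB, oddT]
  rfl

theorem Bfold (ps : List (List Char)) : ∀ (toks : List (List Char)) (buf : List Char),
    ((ps.dropLast.foldl stepB (toks, none)).1 = toks ++ tokN ps)
    ∧ ((ps.dropLast.foldl stepB (toks, some buf)).1 = toks ++ tokC false buf ps) := by
  induction ps with
  | nil => intro toks buf; constructor <;> simp [tokN, tokC]
  | cons p ps ih =>
    intro toks buf
    cases ps with
    | nil => constructor <;> simp [tokN_single, tokC_single]
    | cons q rest =>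
      constructor
      · rw [List.dropLast_cons₂, List.foldl_cons, stepB_none, tokN_cons]
        exact (ih toks []).2
      · rw [List.dropLast_cons₂, List.foldl_cons, stepB_some,
          L_part p.length p le_rfl buf q rest]
        by_cases ho : oddT p
        · rw [if_pos ho, if_pos ho]
          exact (ih toks (buf ++ p ++ ['"'])).2
        · rw [if_neg ho, if_neg ho, (ih (toks ++ [buf ++ p]) buf).1]
          simp

theorem selE (xs : List (List Char)) : ∀ (n : Int),
    (((PySem.List.enumerate xs n).filter (fun p => p.1 % 2 == 0)).map (fun p => unesc p.2))
      = (selectT (n % 2 == 0) xs).map unesc := by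
  induction xs with
  | nil => intro n; simp [PySem.List.enumerate_nil, selectT]
  | cons x xs ih =>
    intro n
    rw [PySem.List.enumerate_cons]
    have hpar : (((n + 1) % 2 == 0) : Bool) = !(n % 2 == 0) := by
      rcases Int.emod_two_eq n with h | h
      · have h1 : (n + 1) % 2 = 1 := by omega
        rw [h1, h]; rfl
      · have h1 : (n + 1) % 2 = 0 := by omega
        rw [h1, h]; rfl
    cases hb : (n % 2 == 0 : Bool) with
    | true =>
      rw [show selectT true (x :: xs) = x :: selectT false xs from by
        rw [selectT, if_pos rfl, Bool.not_true]]
      simp only [List.filter_cons, hb]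
      rw [if_pos trivial, List.map_cons, List.map_cons, ih (n + 1), hpar, hb]
      rfl
    | false =>
      rw [show selectT false (x :: xs) = selectT true xs from by
        rw [selectT, if_neg (by simp), Bool.not_false]]
      simp only [List.filter_cons, hb]
      rw [if_neg (by simp), ih (n + 1), hpar, hb]
      rfl

-- ===== VERDICT (by name: the statement is the Claim_ definition above) =====
theorem parse_spec : Claim_equal_parse := by
  intro json _
  simp only [Spec_parse, parse, parse_alt]
  rw [splitOn_eq_splitQ]
  rw [(Afold json.toList true [] []).1]
  rw [(Bfold (splitQ json.toList) [] []).1]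
  rw [selE _ 0]
  rw [show ((0 : Int) % 2 == 0) = true from rfl]
  simp
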